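-- pv_equiv track=rewrite | github.com/University169/progmatic_lab | oher_solutions/01_iteration_solution.py | math_expression
-- ===== SOURCE A (Python) =====
-- def ternary(num): # переводим число в троичную
--     base = 3
--     res = ''
--     while num > 0:
--         res = str(num % base) + res
--         num //= base
--     return res # обращаю внимание, что возвращается строка !!
--
-- def math_expression(k):
--     ter = ternary(k)
--     ter_list = list(ter)
--     mark = [''] * 9
--     for i in range(1, 10):
--         t = i - 1
--         i *= (-1)
--         if t < len(ter_list):
--             element = int(ter_list[i])
--             if element == 0:
--                 mark[i] = ''
--             elif element == 1:
--                 mark[i] = '+'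
--             elif element == 2:
--                 mark[i] = '-'
--         else:
--             mark[i] = ''
--     math_expression = ''
--     for i in range(9):
--         math_expression += f'{9-i}{mark[i]}'
--     math_expression += '0'
--     # math_expression = f'9{mark[0]}8{mark[1]}7{mark[2]}6{mark[3]}5{mark[4]}4{mark[5]}3{mark[6]}2{mark[7]}1{mark[8]}0'
--     return math_expression
-- ===== SOURCE B (Python) =====
-- SIGNS = ('', '+', '-')
--
-- def math_expression(k):
--     parts = []
--     for n in range(9, 0, -1):
--         d = (k // 3 ** (n - 1)) % 3 if k > 0 else 0
--         parts.append(str(n) + SIGNS[d])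
--     return ''.join(parts) + '0'
-- ===== Notes on version B (the rewrite author's own statement) =====
-- stated objective: simpler
-- what changed: Drops the ternary() string helper, the list-of-chars indexing, the negative-index mark array and the second assembly loop: a single loop over the nine slots computes each slot's base-three digit directly by floor-dividing k by the slot's power of three and appends the slot number with its sign.
import Mathlib
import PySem

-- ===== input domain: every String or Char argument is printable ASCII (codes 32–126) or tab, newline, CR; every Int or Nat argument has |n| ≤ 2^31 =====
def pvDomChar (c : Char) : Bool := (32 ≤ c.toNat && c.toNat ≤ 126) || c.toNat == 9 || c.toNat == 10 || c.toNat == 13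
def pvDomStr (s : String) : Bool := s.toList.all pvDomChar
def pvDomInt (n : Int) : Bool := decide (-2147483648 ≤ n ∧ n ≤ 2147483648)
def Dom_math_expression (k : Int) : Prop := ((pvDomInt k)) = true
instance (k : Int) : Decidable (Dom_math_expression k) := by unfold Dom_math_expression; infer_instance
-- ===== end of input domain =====

-- B replaces A's ternary-string helper, negative-index mark array and second assembly loop by one
-- loop computing each slot's base-3 digit directly with a power formula (objective: simpler).

-- ===== PORT A =====
def ternaryGo (num : Int) (res : String) : String :=
  if 0 < num then
    ternaryGo (PySem.Int.floordiv num 3) (PySem.Int.toStr (PySem.Int.mod num 3) ++ res)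
  else res
termination_by num.toNat
decreasing_by
  rename_i h
  have := PySem.Int.floordiv_eq_ediv_of_pos (a := num) (b := 3) (by omega)
  omega

def ternary (num : Int) : String := ternaryGo num ""

def math_expression (k : Int) : String :=
  let ter := ternary k
  let ter_list := ter.toList
  let mark0 : List String := List.replicate 9 ""
  let mark := (PySem.List.pyRange 1 10 1).foldl (fun mark i =>
    let t := i - 1
    let i := i * (-1)
    if t < (ter_list.length : Int) then
      let element := (PySem.Int.ofStr? (String.ofList [(PySem.List.pyGet? ter_list i).getD '0'])).getD 0
      if element = 0 then PySem.List.pySetD mark i ""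
      else if element = 1 then PySem.List.pySetD mark i "+"
      else if element = 2 then PySem.List.pySetD mark i "-"
      else mark
    else PySem.List.pySetD mark i "") mark0
  let me := (PySem.List.pyRange 0 9 1).foldl (fun s i =>
    s ++ PySem.Int.toStr (9 - i) ++ PySem.List.pyGetD mark i "") ""
  me ++ "0"

-- ===== PORT B =====
def pvSIGNS : List String := ["", "+", "-"]

def math_expression_alt (k : Int) : String :=
  let parts := (PySem.List.pyRange 9 0 (-1)).foldl (fun parts n =>
    let d : Int := if 0 < k then PySem.Int.mod (PySem.Int.floordiv k ((3 : Int) ^ (n - 1).toNat)) 3 else 0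
    parts ++ [PySem.Int.toStr n ++ PySem.List.pyGetD pvSIGNS d ""]) []
  PySem.Str.join "" parts ++ "0"

-- ===== PRECONDITION & SPEC =====
def Spec_math_expression (k : Int) (out : String) : Prop := out = math_expression_alt k
instance (k : Int) (out : String) : Decidable (Spec_math_expression k out) := by unfold Spec_math_expression; infer_instance

-- ===== CLAIM (what is proved, stated in full; the proofs are below) =====
def Claim_equal_math_expression : Prop := ∀ (k : Int), Dom_math_expression k → Spec_math_expression k (math_expression k)

-- ===== LEMMAS AND PROOFS =====
def dgt (k : Int) (j : Nat) : Int := PySem.Int.mod (PySem.Int.floordiv k ((3 : Int) ^ j)) 3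

def chr3 (d : Int) : Char := if d = 1 then '1' else if d = 2 then '2' else '0'

def sign3 (d : Int) : String := if d = 1 then "+" else if d = 2 then "-" else ""

def sgn (k : Int) (j : Nat) : String := if (3 : Int) ^ j ≤ k then sign3 (dgt k j) else ""

theorem ternaryGo_acc (num : Int) (res : String) :
    ternaryGo num res = ternaryGo num "" ++ res := by
  conv_lhs => rw [ternaryGo]
  conv_rhs => rw [ternaryGo]
  split_ifs with h
  · rw [ternaryGo_acc (PySem.Int.floordiv num 3),
        ternaryGo_acc (PySem.Int.floordiv num 3) (PySem.Int.toStr (PySem.Int.mod num 3) ++ "")]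
    simp [String.append_assoc]
  · simp
termination_by num.toNat
decreasing_by
  all_goals
    have := PySem.Int.floordiv_eq_ediv_of_pos (a := num) (b := 3) (by omega)
    omega

theorem T_char (num : Int) (j : Nat) :
    (ternary num).toList.reverse[j]? =
      if (3 : Int) ^ j ≤ num then some (chr3 (dgt num j)) else none := by
  by_cases h : 0 < num
  · have hq := PySem.Int.floordiv_eq_ediv_of_pos (a := num) (b := 3) (by omega)
    have hm0 : 0 ≤ PySem.Int.mod num 3 := PySem.Int.mod_nonneg _ (by omega)
    have hm3 : PySem.Int.mod num 3 < 3 := PySem.Int.mod_lt _ (by omega)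
    have hme : PySem.Int.mod num 3 = PySem.Int.mod num 3 := rfl
    have hs : (PySem.Int.toStr (PySem.Int.mod num 3)).toList = [chr3 (PySem.Int.mod num 3)] := by
      rcases (by omega : PySem.Int.mod num 3 = 0 ∨ PySem.Int.mod num 3 = 1 ∨ PySem.Int.mod num 3 = 2) with h0 | h0 | h0 <;>
        rw [h0] <;> decide
    have hT : (ternary num).toList = (ternary (PySem.Int.floordiv num 3)).toList ++ [chr3 (PySem.Int.mod num 3)] := by
      show (ternaryGo num "").toList = _
      conv_lhs => rw [ternaryGo]
      rw [if_pos h, ternaryGo_acc]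
      show (ternary (PySem.Int.floordiv num 3) ++ (PySem.Int.toStr (PySem.Int.mod num 3) ++ "")).toList = _
      simp only [String.append_empty, String.toList_append, hs]
    rw [hT]
    cases j with
    | zero =>
      simp only [List.reverse_append, List.reverse_singleton, List.singleton_append,
        List.getElem?_cons_zero]
      rw [if_pos (by simpa using h)]
      have : dgt num 0 = PySem.Int.mod num 3 := by
        unfold dgt
        rw [pow_zero, PySem.Int.floordiv_eq_ediv_of_pos (a := num) (b := 1) (by omega), Int.ediv_one]
      rw [this]
    | succ j =>
      simp only [List.reverse_append, List.reverse_singleton, List.singleton_append,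
        List.getElem?_cons_succ]
      rw [T_char (PySem.Int.floordiv num 3) j]
      have hiff : ((3:Int) ^ j ≤ PySem.Int.floordiv num 3) ↔ ((3:Int) ^ (j+1) ≤ num) := by
        rw [hq, Int.le_ediv_iff_mul_le (by omega), pow_succ]
      have hd : dgt (PySem.Int.floordiv num 3) j = dgt num (j+1) := by
        unfold dgt
        rw [hq]
        have h2 := PySem.Int.floordiv_eq_ediv_of_pos (a := num / 3) (b := (3:Int)^j) (by positivity)
        have h3 := PySem.Int.floordiv_eq_ediv_of_pos (a := num) (b := (3:Int)^(j+1)) (by positivity)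
        rw [h2, h3, Int.ediv_ediv_of_nonneg (by positivity), pow_succ]
        ring_nf
      simp only [hiff, hd]
  · have hT : ternary num = "" := by
      show ternaryGo num "" = ""
      rw [ternaryGo, if_neg h]
    rw [hT]
    have : ¬ ((3:Int) ^ j ≤ num) := by
      have : (0:Int) < 3 ^ j := by positivity
      omega
    simp [this]
termination_by num.toNat
decreasing_by
  all_goals
    have := PySem.Int.floordiv_eq_ediv_of_pos (a := num) (b := 3) (by omega)
    omega

theorem T_len (num : Int) (j : Nat) :
    ((ternary num).toList.length ≤ j) ↔ num < (3 : Int) ^ j := by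
  have h := T_char num j
  by_cases hc : (3:Int) ^ j ≤ num
  · rw [if_pos hc] at h
    constructor
    · intro hle
      rw [List.getElem?_eq_none (by simpa using hle)] at h
      cases h
    · intro hlt; exact absurd hc (not_le.mpr hlt)
  · rw [if_neg hc] at h
    have hlen : (ternary num).toList.length ≤ j := by
      have := List.getElem?_eq_none_iff.mp h
      simpa using this
    exact iff_of_true hlen (not_le.mp hc)

theorem dgt_bounds (k : Int) (j : Nat) : 0 ≤ dgt k j ∧ dgt k j < 3 :=
  ⟨PySem.Int.mod_nonneg _ (by omega), PySem.Int.mod_lt _ (by omega)⟩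

theorem stepA (k : Int) (mark : List String) (i : Int) (h1 : 1 ≤ i) (h2 : i < 10) :
    (if i - 1 < (((ternary k).toList.length : Nat) : Int) then
       (let element := (PySem.Int.ofStr? (String.ofList [(PySem.List.pyGet? (ternary k).toList (i * -1)).getD '0'])).getD 0
        if element = 0 then PySem.List.pySetD mark (i * -1) ""
        else if element = 1 then PySem.List.pySetD mark (i * -1) "+"
        else if element = 2 then PySem.List.pySetD mark (i * -1) "-"
        else mark)
     else PySem.List.pySetD mark (i * -1) "") = PySem.List.pySetD mark (i * -1) (sgn k (i - 1).toNat) := by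
  set j : Nat := (i - 1).toNat with hj
  have hij : i - 1 = (j : Int) := by omega
  by_cases hg : i - 1 < (((ternary k).toList.length : Nat) : Int)
  · rw [if_pos hg]
    have hjlen : j < (ternary k).toList.length := by omega
    have hk3 : (3:Int) ^ j ≤ k := by
      by_contra hc
      have := (T_len k j).mpr (not_le.mp hc)
      omega
    have hget : PySem.List.pyGet? (ternary k).toList (i * -1) = some (chr3 (dgt k j)) := by
      have h01 : i * -1 = -((j+1 : Nat) : Int) := by omega
      rw [h01, PySem.List.pyGet?_neg_natCast _ _ (by omega) (by omega)]
      have := T_char k j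
      rw [if_pos hk3] at this
      rw [← this, List.getElem?_reverse hjlen]
      congr 1
      omega
    rw [hget]
    have hd := dgt_bounds k j
    have hsgn : sgn k j = sign3 (dgt k j) := if_pos hk3
    rcases (by omega : dgt k j = 0 ∨ dgt k j = 1 ∨ dgt k j = 2) with h0 | h0 | h0 <;>
      · rw [h0] at hsgn ⊢
        simp [hsgn, sign3, show (PySem.Int.ofChars? [chr3 0]).getD 0 = 0 from by decide, show (PySem.Int.ofChars? [chr3 1]).getD 0 = 1 from by decide, show (PySem.Int.ofChars? [chr3 2]).getD 0 = 2 from by decide]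
  · rw [if_neg hg]
    have hk3 : ¬ (3:Int) ^ j ≤ k := by
      have hlen : (ternary k).toList.length ≤ j := by omega
      exact not_le.mpr ((T_len k j).mp hlen)
    rw [sgn, if_neg hk3]

theorem B_sign (k : Int) (j : Nat) :
    PySem.List.pyGetD pvSIGNS (if 0 < k then PySem.Int.mod (PySem.Int.floordiv k ((3:Int) ^ j)) 3 else 0) "" = sgn k j := by
  by_cases hk : 0 < k
  · rw [if_pos hk]
    by_cases hc : (3:Int) ^ j ≤ k
    · have hd := dgt_bounds k j
      rw [show PySem.Int.mod (PySem.Int.floordiv k ((3:Int) ^ j)) 3 = dgt k j from rfl,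
          sgn, if_pos hc]
      rcases (by omega : dgt k j = 0 ∨ dgt k j = 1 ∨ dgt k j = 2) with h0 | h0 | h0 <;>
        rw [h0] <;> decide
    · have h0 : dgt k j = 0 := by
        unfold dgt
        rw [PySem.Int.floordiv_eq_ediv_of_pos (a := k) (b := (3:Int) ^ j) (by positivity),
            Int.ediv_eq_zero_of_lt (by omega) (by omega)]
        decide
      rw [show PySem.Int.mod (PySem.Int.floordiv k ((3:Int) ^ j)) 3 = dgt k j from rfl,
          h0, sgn, if_neg hc]
      decide
  · have h3 : (0:Int) < 3 ^ j := by positivity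
    rw [if_neg hk, sgn, if_neg (by omega)]
    decide

theorem markA (k : Int) :
    List.foldl (fun mark i =>
      if i - 1 < ((ternary k).toList.length : Int) then
        if (PySem.Int.ofStr? (String.ofList [(PySem.List.pyGet? (ternary k).toList (i * -1)).getD '0'])).getD 0 = 0 then
          PySem.List.pySetD mark (i * -1) ""
        else if (PySem.Int.ofStr? (String.ofList [(PySem.List.pyGet? (ternary k).toList (i * -1)).getD '0'])).getD 0 = 1 then
          PySem.List.pySetD mark (i * -1) "+"
        else if (PySem.Int.ofStr? (String.ofList [(PySem.List.pyGet? (ternary k).toList (i * -1)).getD '0'])).getD 0 = 2 then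
          PySem.List.pySetD mark (i * -1) "-"
        else mark
      else PySem.List.pySetD mark (i * -1) "") (List.replicate 9 "") [1,2,3,4,5,6,7,8,9]
    = [sgn k 8, sgn k 7, sgn k 6, sgn k 5, sgn k 4, sgn k 3, sgn k 2, sgn k 1, sgn k 0] := by
  refine (PySem.List.foldl_congr_mem _ _
      (fun mark i => PySem.List.pySetD mark (i * -1) (sgn k (i - 1).toNat)) _ ?_).trans ?_
  · intro acc x hx
    have hb : 1 ≤ x ∧ x < 10 := by
      rcases (by simpa using hx : x = 1 ∨ x = 2 ∨ x = 3 ∨ x = 4 ∨ x = 5 ∨ x = 6 ∨ x = 7 ∨ x = 8 ∨ x = 9) with h|h|h|h|h|h|h|h|h <;> omega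
    exact stepA k acc x hb.1 hb.2
  · simp [PySem.List.pySetD, PySem.List.pySet?, PySem.List.pyIdx?]

theorem partsB (k : Int) :
    List.foldl (fun parts n =>
      parts ++ [PySem.Int.toStr n ++ PySem.List.pyGetD pvSIGNS
        (if 0 < k then PySem.Int.mod (PySem.Int.floordiv k ((3 : Int) ^ (n - 1).toNat)) 3 else 0) ""]) [] [9,8,7,6,5,4,3,2,1]
    = [PySem.Int.toStr 9 ++ sgn k 8, PySem.Int.toStr 8 ++ sgn k 7, PySem.Int.toStr 7 ++ sgn k 6,
       PySem.Int.toStr 6 ++ sgn k 5, PySem.Int.toStr 5 ++ sgn k 4, PySem.Int.toStr 4 ++ sgn k 3,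
       PySem.Int.toStr 3 ++ sgn k 2, PySem.Int.toStr 2 ++ sgn k 1, PySem.Int.toStr 1 ++ sgn k 0] := by
  simp only [List.foldl_cons, List.foldl_nil, List.nil_append, List.cons_append,
    show ((9:Int) - 1).toNat = 8 from by decide, show ((8:Int) - 1).toNat = 7 from by decide,
    show ((7:Int) - 1).toNat = 6 from by decide, show ((6:Int) - 1).toNat = 5 from by decide,
    show ((5:Int) - 1).toNat = 4 from by decide, show ((4:Int) - 1).toNat = 3 from by decide,
    show ((3:Int) - 1).toNat = 2 from by decide, show ((2:Int) - 1).toNat = 1 from by decide,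
    show ((1:Int) - 1).toNat = 0 from by decide, B_sign]

theorem main_eq (k : Int) : math_expression k = math_expression_alt k := by
  unfold math_expression math_expression_alt
  simp only []
  rw [show PySem.List.pyRange 1 10 1 = [1,2,3,4,5,6,7,8,9] from by decide,
      show PySem.List.pyRange 0 9 1 = [0,1,2,3,4,5,6,7,8] from by decide,
      show PySem.List.pyRange 9 0 (-1) = [9,8,7,6,5,4,3,2,1] from by decide,
      markA k, partsB k]
  norm_num [List.foldl_cons, List.foldl_nil, PySem.List.pyGetD, PySem.List.pyGet?, PySem.List.pyIdx?,
            PySem.Str.join, PySem.Chars.join, String.append_assoc]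
  have hts : ∀ n : Int, String.ofList (PySem.Int.toChars n) = PySem.Int.toStr n := fun n => by
    rw [← PySem.Int.toList_toStr, String.ofList_toList]
  norm_num [hts, PySem.Str.join, PySem.Chars.join, List.intercalate, List.intersperse, String.append_assoc,
            show Int.toNat 2 = 2 from rfl, show Int.toNat 3 = 3 from rfl, show Int.toNat 4 = 4 from rfl,
            show Int.toNat 5 = 5 from rfl, show Int.toNat 6 = 6 from rfl, show Int.toNat 7 = 7 from rfl,
            show Int.toNat 8 = 8 from rfl]

-- ===== VERDICT (by name: the statement is the Claim_ definition above) =====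
theorem math_expression_spec : Claim_equal_math_expression := by
  intro k _
  exact main_eq k
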